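-- pv_equiv track=rewrite | github.com/SanjoSolutions/SlayTheSpireFightPredictor | main.py | get_stats_by_floor_with_list
-- ===== SOURCE A (Python) =====
-- def get_stats_by_floor_with_list(data, data_key):
--     stats_by_floor = dict()
--     if data_key in data:
--         for stat in data[data_key]:
--             floor = stat['floor']
--             if floor not in stats_by_floor:
--                 stats_by_floor[floor] = list()
--             stats_by_floor[floor].append(stat['key'])
--     return stats_by_floor
-- ===== SOURCE B (Python) =====
-- def get_stats_by_floor_with_list(data, data_key):
--     stats = data.get(data_key, [])
--     floors = []
--     for stat in stats:
--         floor = stat['floor']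
--         if floor not in floors:
--             floors.append(floor)
--     return {floor: [stat['key'] for stat in stats if stat['floor'] == floor]
--             for floor in floors}
-- ===== Notes on version B (the rewrite author's own statement) =====
-- stated objective: alternative
-- what changed: Replaces A's single-pass dict-building loop (membership test, lazy list creation, in-place append) with a two-phase plan: first collect the distinct floors in first-encounter order, then build the result with a dict comprehension whose values are filter-based list comprehensions over the stats.
import Mathlib
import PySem

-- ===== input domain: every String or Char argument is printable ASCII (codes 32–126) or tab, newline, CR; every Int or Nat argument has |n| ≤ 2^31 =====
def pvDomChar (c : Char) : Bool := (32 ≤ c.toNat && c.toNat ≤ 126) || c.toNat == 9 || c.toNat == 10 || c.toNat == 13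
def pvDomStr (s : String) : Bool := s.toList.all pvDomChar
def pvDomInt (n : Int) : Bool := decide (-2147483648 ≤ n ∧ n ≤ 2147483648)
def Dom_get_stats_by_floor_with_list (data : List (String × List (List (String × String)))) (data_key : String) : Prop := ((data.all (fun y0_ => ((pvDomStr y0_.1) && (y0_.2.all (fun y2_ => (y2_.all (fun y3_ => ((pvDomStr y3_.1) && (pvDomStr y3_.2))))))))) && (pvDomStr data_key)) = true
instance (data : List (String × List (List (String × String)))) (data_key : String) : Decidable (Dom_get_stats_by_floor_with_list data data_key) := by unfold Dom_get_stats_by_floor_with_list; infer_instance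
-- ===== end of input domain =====

-- B collects the distinct floors first and then builds each group by filtering per floor,
-- instead of A's single-pass dict accumulation; same return value (objective: alternative).


-- ===== PORT A =====
def get_stats_by_floor_with_list (data : List (String × List (List (String × String)))) (data_key : String) : List (String × List String) :=
  let stats_by_floor : PySem.Dict String (List String) := PySem.Dict.empty
  let stats_by_floor :=
    if (PySem.Dict.mk data).contains data_key then
      (((PySem.Dict.mk data).get? data_key).getD []).foldl (fun d stat =>
        let floor := ((PySem.Dict.mk stat).get? "floor").getD ""   -- KeyError excluded by Pre_
        let d := if d.contains floor then d else d.insert floor []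
        d.modify floor [] (fun l => l ++ [((PySem.Dict.mk stat).get? "key").getD ""])) stats_by_floor
    else stats_by_floor
  stats_by_floor.items

-- ===== PORT B =====
def get_stats_by_floor_with_list_alt (data : List (String × List (List (String × String)))) (data_key : String) : List (String × List String) :=
  let stats := ((PySem.Dict.mk data).get? data_key).getD []
  let floors := stats.foldl (fun fs stat =>
      let floor := ((PySem.Dict.mk stat).get? "floor").getD ""     -- KeyError excluded by Pre_
      if floor ∈ fs then fs else fs ++ [floor]) []
  floors.map (fun floor => (floor,
    (stats.filter (fun stat => ((PySem.Dict.mk stat).get? "floor").getD "" == floor)).map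
      (fun stat => ((PySem.Dict.mk stat).get? "key").getD "")))

-- ===== PRECONDITION & SPEC =====
-- Pre_ excludes exactly the inputs where Python A raises KeyError: a stat dict under
-- data[data_key] missing the 'floor' or 'key' key (B raises there too).
def Pre_get_stats_by_floor_with_list (data : List (String × List (List (String × String)))) (data_key : String) : Prop :=
  (((PySem.Dict.mk data).get? data_key).getD []).all
    (fun stat => ((PySem.Dict.mk stat).get? "floor").isSome && ((PySem.Dict.mk stat).get? "key").isSome) = true
instance (data : List (String × List (List (String × String)))) (data_key : String) : Decidable (Pre_get_stats_by_floor_with_list data data_key) := by unfold Pre_get_stats_by_floor_with_list; infer_instance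
def pvWitness_get_stats_by_floor_with_list : (List (String × List (List (String × String)))) × String :=
  ([("a", [[("floor", "1"), ("key", "x")], [("floor", "2"), ("key", "y")], [("floor", "1"), ("key", "z")]])], "a")

def Spec_get_stats_by_floor_with_list (data : List (String × List (List (String × String)))) (data_key : String) (out : List (String × List String)) : Prop := out = get_stats_by_floor_with_list_alt data data_key
instance (data : List (String × List (List (String × String)))) (data_key : String) (out : List (String × List String)) : Decidable (Spec_get_stats_by_floor_with_list data data_key out) := by unfold Spec_get_stats_by_floor_with_list; infer_instance

-- ===== CLAIM (what is proved, stated in full; the proofs are below) =====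
def Claim_equal_get_stats_by_floor_with_list : Prop := ∀ (data : List (String × List (List (String × String)))) (data_key : String), Dom_get_stats_by_floor_with_list data data_key → Pre_get_stats_by_floor_with_list data data_key → Spec_get_stats_by_floor_with_list data data_key (get_stats_by_floor_with_list data data_key)

-- ===== LEMMAS AND PROOFS =====

-- A's loop body ('if missing, insert []; then append') is modify with default [].
theorem pvStepEqModify (d : PySem.Dict String (List String)) (fl k : String) :
    (let d' := if d.contains fl then d else d.insert fl [];
     d'.modify fl [] (fun l => l ++ [k])) = d.modify fl [] (fun l => l ++ [k]) := by
  by_cases h : d.contains fl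
  · simp [h]
  · have h' : d.contains fl = false := by simpa using h
    simp only [h', Bool.false_eq_true, if_false]
    simp only [PySem.Dict.modify, PySem.Dict.getD_insert_self,
      PySem.Dict.insert_insert_self, PySem.Dict.getD_of_not_contains d [] h']

theorem pvMainEq (stats : List (List (String × String))) :
    (stats.foldl (fun d stat =>
        let floor := ((PySem.Dict.mk stat).get? "floor").getD ""
        let d := if d.contains floor then d else d.insert floor []
        d.modify floor [] (fun l => l ++ [((PySem.Dict.mk stat).get? "key").getD ""]))
      (PySem.Dict.empty : PySem.Dict String (List String))).items =
    (stats.foldl (fun fs stat =>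
        let floor := ((PySem.Dict.mk stat).get? "floor").getD ""
        if floor ∈ fs then fs else fs ++ [floor]) []).map (fun floor => (floor,
      (stats.filter (fun stat => ((PySem.Dict.mk stat).get? "floor").getD "" == floor)).map
        (fun stat => ((PySem.Dict.mk stat).get? "key").getD ""))) := by
  set f : List (String × String) → String := fun stat => ((PySem.Dict.mk stat).get? "floor").getD "" with hf
  set k : List (String × String) → String := fun stat => ((PySem.Dict.mk stat).get? "key").getD "" with hk
  -- A's fold equals the modify-fold
  have hA : (stats.foldl (fun d stat =>
        let floor := f stat
        let d := if d.contains floor then d else d.insert floor []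
        d.modify floor [] (fun l => l ++ [k stat]))
      (PySem.Dict.empty : PySem.Dict String (List String))) =
      (stats.foldl (fun d stat => d.modify (f stat) [] (fun l => l ++ [k stat])) PySem.Dict.empty) := by
    apply PySem.List.foldl_congr_mem
    intro d stat _
    exact pvStepEqModify d (f stat) (k stat)
  rw [hA]
  -- B's floors fold equals Set.ofList (stats.map f)
  have hB : (stats.foldl (fun fs stat =>
        let floor := f stat
        if floor ∈ fs then fs else fs ++ [floor]) ([] : List String)) =
      PySem.Set.ofList (stats.map f) := by
    rw [← PySem.Set.update_nil_left, PySem.Set.update_map_eq_foldl_add]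
    apply PySem.List.foldl_congr_mem
    intro fs stat _
    simp [PySem.Set.add_eq_ite]
  rw [hB]
  -- keys of the modify-fold
  have hkeys : (stats.foldl (fun d stat => d.modify (f stat) [] (fun l => l ++ [k stat]))
      (PySem.Dict.empty : PySem.Dict String (List String))).keys = PySem.Set.ofList (stats.map f) := by
    rw [PySem.Dict.keys_foldl_modify_key stats f [] (fun _ stat l => l ++ [k stat])]
    simp [PySem.Dict.keys_empty, PySem.Set.update_nil_left]
  have hnd : (stats.foldl (fun d stat => d.modify (f stat) [] (fun l => l ++ [k stat]))
      (PySem.Dict.empty : PySem.Dict String (List String))).keys.Nodup :=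
    PySem.Dict.nodup_keys_foldl_modify_key stats f [] (fun _ stat l => l ++ [k stat]) _
      (by simp [PySem.Dict.keys_empty])
  rw [PySem.Dict.items_eq_map_keys _ hnd [], hkeys]
  apply List.map_congr_left
  intro fl _
  refine congrArg (fun v => (fl, v)) ?_
  -- getD of the modify-fold, via the pair-list form
  have hfold : (stats.foldl (fun d stat => d.modify (f stat) [] (fun l => l ++ [k stat]))
      (PySem.Dict.empty : PySem.Dict String (List String))) =
      ((stats.map (fun s => (f s, k s))).foldl (fun d p => d.modify p.1 [] (fun l => l ++ [p.2]))
        PySem.Dict.empty) := by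
    rw [List.foldl_map]
  rw [hfold, PySem.Dict.getD_foldl_modify_append, PySem.Dict.getD_empty]
  simp only [List.nil_append, List.filter_map, List.map_map]
  rfl

-- ===== VERDICT (by name: the statement is the Claim_ definition above) =====
theorem get_stats_by_floor_with_list_spec : Claim_equal_get_stats_by_floor_with_list := by
  intro data data_key _ _
  unfold Spec_get_stats_by_floor_with_list
  unfold get_stats_by_floor_with_list get_stats_by_floor_with_list_alt
  by_cases h : (PySem.Dict.mk data).contains data_key
  · simp only [h, if_true]
    exact pvMainEq _
  · have hget : (PySem.Dict.mk data).get? data_key = none := by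
      rw [PySem.Dict.get?_eq_none_iff_contains, Bool.eq_false_iff]; exact h
    simp [h, hget, PySem.Dict.empty]
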